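-- pv_equiv track=rewrite | github.com/cqfn/veniq | veniq/baselines/semi/benefits.py | _check_is_common
-- ===== SOURCE A (Python) =====
-- from typing import Tuple, Dict, List
-- from collections import Counter
--
-- def _check_is_common(
--     dict_file: Dict,
--     statement_1: int,
--     statement_2: int
-- ) -> bool:
--     joined_names: Counter = Counter(dict_file[statement_1] + dict_file[statement_2])
--     duplicates = {element: count for element, count in joined_names.items() if count > 1}.keys()
--     return len(list(duplicates)) >= 1
-- ===== SOURCE B (Python) =====
-- def _check_is_common(dict_file, statement_1, statement_2):
--     seen = set()
--     for name in dict_file[statement_1] + dict_file[statement_2]: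
--         if name in seen:
--             return True
--         seen.add(name)
--     return False
-- ===== Notes on version B (the rewrite author's own statement) =====
-- stated objective: simpler
-- what changed: Replaced the Counter-build-then-filter-then-materialise-keys pipeline with a single early-exiting scan over the concatenation that keeps a seen-set and returns True at the first repeat.
import Mathlib
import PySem

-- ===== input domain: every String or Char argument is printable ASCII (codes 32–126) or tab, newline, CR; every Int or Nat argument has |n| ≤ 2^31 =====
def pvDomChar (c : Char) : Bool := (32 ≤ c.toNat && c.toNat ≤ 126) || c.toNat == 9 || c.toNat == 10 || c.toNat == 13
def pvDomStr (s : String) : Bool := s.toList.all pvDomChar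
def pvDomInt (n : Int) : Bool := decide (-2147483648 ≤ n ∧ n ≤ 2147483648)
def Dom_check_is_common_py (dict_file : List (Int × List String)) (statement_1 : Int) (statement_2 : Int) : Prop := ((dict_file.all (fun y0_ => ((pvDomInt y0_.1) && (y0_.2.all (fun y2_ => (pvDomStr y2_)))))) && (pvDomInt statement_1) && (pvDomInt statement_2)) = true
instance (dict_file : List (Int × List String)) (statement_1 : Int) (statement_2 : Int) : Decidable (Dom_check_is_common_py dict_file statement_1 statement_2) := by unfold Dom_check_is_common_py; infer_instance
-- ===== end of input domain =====

-- Header: B replaces A's Counter-then-filter pipeline with one early-exiting seen-set scan (simpler; return value only).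

-- ===== PORT A =====
def check_is_common_py (dict_file : List (Int × List String)) (statement_1 : Int) (statement_2 : Int) : Bool :=
  match (PySem.Dict.mk dict_file).get? statement_1, (PySem.Dict.mk dict_file).get? statement_2 with
  | some l1, some l2 =>
    let joined_names : PySem.Dict String Int := PySem.Dict.counter (l1 ++ l2)
    let duplicates : List String := ((joined_names.items.filter (fun p => 1 < p.2)).map Prod.fst)
    decide ((duplicates.length : Int) ≥ 1)
  | _, _ => false   -- KeyError: excluded by Pre_

-- ===== PORT B =====
def bScan (seen : PySem.Set String) : List String → Bool
  | [] => false
  | x :: rest => if PySem.Set.contains seen x then true else bScan (PySem.Set.add seen x) rest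

def check_is_common_py_alt (dict_file : List (Int × List String)) (statement_1 : Int) (statement_2 : Int) : Bool :=
  match (PySem.Dict.mk dict_file).get? statement_1 with
  | none => false   -- KeyError: excluded by Pre_
  | some l1 =>
    match (PySem.Dict.mk dict_file).get? statement_2 with
    | none => false   -- KeyError: excluded by Pre_
    | some l2 => bScan PySem.Set.empty (l1 ++ l2)

-- ===== PRECONDITION & SPEC =====
-- Pre_ excludes exactly the inputs where Python raises KeyError (a statement id not a key of dict_file); both A and B raise there.
def Pre_check_is_common_py (dict_file : List (Int × List String)) (statement_1 : Int) (statement_2 : Int) : Prop :=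
  (PySem.Dict.mk dict_file).contains statement_1 = true ∧ (PySem.Dict.mk dict_file).contains statement_2 = true
instance (dict_file : List (Int × List String)) (statement_1 : Int) (statement_2 : Int) : Decidable (Pre_check_is_common_py dict_file statement_1 statement_2) := by unfold Pre_check_is_common_py; infer_instance
def pvWitness_check_is_common_py : (List (Int × List String)) × Int × Int := ([(1, ["a", "b"]), (2, ["a"])], 1, 2)
def Spec_check_is_common_py (dict_file : List (Int × List String)) (statement_1 : Int) (statement_2 : Int) (out : Bool) : Prop := out = check_is_common_py_alt dict_file statement_1 statement_2
instance (dict_file : List (Int × List String)) (statement_1 : Int) (statement_2 : Int) (out : Bool) : Decidable (Spec_check_is_common_py dict_file statement_1 statement_2 out) := by unfold Spec_check_is_common_py; infer_instance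

-- ===== CLAIM (what is proved, stated in full; the proofs are below) =====
def Claim_equal_check_is_common_py : Prop := ∀ (dict_file : List (Int × List String)) (statement_1 : Int) (statement_2 : Int), Dom_check_is_common_py dict_file statement_1 statement_2 → Pre_check_is_common_py dict_file statement_1 statement_2 → Spec_check_is_common_py dict_file statement_1 statement_2 (check_is_common_py dict_file statement_1 statement_2)

-- ===== LEMMAS AND PROOFS =====

theorem bScan_true_iff (xs : List String) : ∀ (seen : List String),
    bScan seen xs = true ↔ (¬ xs.Nodup ∨ ∃ x ∈ xs, x ∈ seen) := by
  induction xs with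
  | nil => simp [bScan]
  | cons x rest ih =>
    intro seen
    by_cases hx : x ∈ seen
    · have hc : PySem.Set.contains seen x = true := by rw [PySem.Set.contains_iff]; exact hx
      simp only [bScan, hc, if_true]
      constructor
      · intro _; exact Or.inr ⟨x, by simp, hx⟩
      · intro _; trivial
    · have hc : PySem.Set.contains seen x = false := by
        rw [Bool.eq_false_iff, Ne, PySem.Set.contains_iff]; exact hx
      simp only [bScan, hc, Bool.false_eq_true, if_false]
      rw [ih]
      constructor
      · rintro (h | ⟨y, hy, hmem⟩)
        · exact Or.inl (fun hnd => h (List.nodup_cons.1 hnd).2)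
        · simp only [PySem.Set.mem_add] at hmem
          rcases hmem with hs | rfl
          · exact Or.inr ⟨y, List.mem_cons_of_mem _ hy, hs⟩
          · exact Or.inl (fun hnd => (List.nodup_cons.1 hnd).1 hy)
      · rintro (h | ⟨y, hy, hs⟩)
        · by_cases hxr : x ∈ rest
          · refine Or.inr ⟨x, hxr, ?_⟩
            simp [PySem.Set.mem_add]
          · exact Or.inl (fun hnd => h (List.nodup_cons.2 ⟨hxr, hnd⟩))
        · rcases List.mem_cons.1 hy with rfl | hy'
          · exact absurd hs hx
          · refine Or.inr ⟨y, hy', ?_⟩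
            simp [PySem.Set.mem_add, hs]

theorem dup_iff (xs : List String) : (∃ k ∈ xs, 1 < xs.count k) ↔ ¬ xs.Nodup := by
  rw [List.nodup_iff_count_le_one]
  constructor
  · rintro ⟨k, _, hk⟩ hall
    have := hall k
    omega
  · intro h
    rcases not_forall.1 h with ⟨a, ha⟩
    exact ⟨a, List.count_pos_iff.1 (by omega), by omega⟩

theorem inner_eq (xs : List String) :
    (decide ((((((PySem.Dict.counter (κ := String) xs).items.filter (fun p => 1 < p.2)).map Prod.fst).length : Int) ≥ 1)))
      = bScan PySem.Set.empty xs := by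
  rw [Bool.eq_iff_iff, bScan_true_iff xs PySem.Set.empty]
  simp only [decide_eq_true_eq, PySem.Dict.items_counter, List.length_map, ge_iff_le]
  constructor
  · intro h
    refine Or.inl ?_
    rw [← dup_iff]
    have hne : (List.filter (fun p => decide (1 < p.2)) ((PySem.Set.ofList xs).map (fun k => (k, (xs.count k : Int))))) ≠ [] := by
      intro he
      rw [he] at h
      simp at h
    rcases List.exists_mem_of_ne_nil _ hne with ⟨p, hp⟩
    rcases List.mem_filter.1 hp with ⟨hpm, hpc⟩
    rcases List.mem_map.1 hpm with ⟨k, hk, rfl⟩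
    exact ⟨k, ((PySem.Set.mem_ofList _ _).1 hk), by simpa using hpc⟩
  · rintro (h | ⟨y, _, hy⟩)
    · rw [← dup_iff] at h
      rcases h with ⟨k, hk, hck⟩
      have hmem : (k, (xs.count k : Int)) ∈ List.filter (fun p => decide (1 < p.2)) ((PySem.Set.ofList xs).map (fun k => (k, (xs.count k : Int)))) :=
        List.mem_filter.2 ⟨List.mem_map.2 ⟨k, ((PySem.Set.mem_ofList _ _).2 hk), rfl⟩, by simpa using hck⟩
      have := List.length_pos_of_mem hmem
      omega
    · simp [PySem.Set.empty] at hy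

-- ===== VERDICT (by name: the statement is the Claim_ definition above) =====
theorem check_is_common_py_spec : Claim_equal_check_is_common_py := by
  intro dict_file s1 s2 _ hpre
  unfold Spec_check_is_common_py check_is_common_py check_is_common_py_alt
  rcases hpre with ⟨h1, h2⟩
  rw [PySem.Dict.contains_eq_isSome_get?] at h1 h2
  cases hg1 : (PySem.Dict.mk dict_file).get? s1 with
  | none => exact absurd h1 (by rw [hg1]; simp)
  | some l1 =>
    cases hg2 : (PySem.Dict.mk dict_file).get? s2 with
    | none => exact absurd h2 (by rw [hg2]; simp)
    | some l2 =>
      simpa using inner_eq (l1 ++ l2)
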